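-- pv_equiv track=rewrite | github.com/SrikanthAmudala/PythonWorkShopConcordia | Week3/decimaltoBinary.py | decimalToComplimentBinary
-- ===== SOURCE A (Python) =====
-- def decimalToComplimentBinary(n):
-- 	if n == 0:
-- 		return 1
-- 	if n==1:
-- 		return 0
-- 	if n==2:
-- 		return 1
-- 	binaryStr = ""
-- 	decimal = 0
-- 	count=0
-- 	while n>=1:
-- 		rem = n%2
-- 		n = n//2
-- 		if rem==0:
-- 			rem =1
-- 		elif rem==1:
-- 			rem = 0
-- 		# binaryStr= rem +binaryStr*10
-- 		binaryStr= str(rem) +binaryStr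
-- 		decimal += rem * 2**count
-- 		count+=1
-- 	return int(binaryStr)
-- ===== SOURCE B (Python) =====
-- def decimalToComplimentBinary(n):
--     return int(''.join('1' if c == '0' else '0' for c in bin(n)[2:]))
-- ===== Notes on version B (the rewrite author's own statement) =====
-- stated objective: simpler
-- what changed: A's divide-by-2 loop with three special cases, an if/elif bit flip, string prepending and two dead accumulators is replaced by a one-liner that flips the characters of bin(n)[2:] and reads the flipped string with a single int().
import Mathlib
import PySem

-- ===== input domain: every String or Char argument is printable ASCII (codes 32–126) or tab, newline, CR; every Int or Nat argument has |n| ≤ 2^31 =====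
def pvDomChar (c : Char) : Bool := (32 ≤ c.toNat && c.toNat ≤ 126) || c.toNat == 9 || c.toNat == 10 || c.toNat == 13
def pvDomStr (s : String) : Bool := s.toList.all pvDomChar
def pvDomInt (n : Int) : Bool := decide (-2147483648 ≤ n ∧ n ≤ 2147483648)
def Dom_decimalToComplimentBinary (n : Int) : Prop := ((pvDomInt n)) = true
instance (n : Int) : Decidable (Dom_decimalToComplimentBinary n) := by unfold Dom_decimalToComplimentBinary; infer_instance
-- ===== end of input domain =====

-- B replaces A's divide-by-2 flipping loop (with its three special cases and dead
-- accumulators) by flipping the characters of bin(n)[2:] and reading them with one int();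
-- objective: simpler.

-- ===== PORT A =====
-- A's while loop: state (binaryStr, decimal, count); Python strings are carried as
-- List Char (str(rem) + binaryStr = toChars rem ++ binaryStr, exact).
-- 2**count is ported as 2 ^ count.toNat — exact, since count starts at 0 and only increments.
def pvLoopA (n : Int) (binaryStr : List Char) (decimal count : Int) :
    List Char × Int × Int :=
  if h : 1 ≤ n then
    let rem := PySem.Int.mod n 2
    let n' := PySem.Int.floordiv n 2
    let rem' := if rem = 0 then (1 : Int) else if rem = 1 then 0 else rem
    pvLoopA n' (PySem.Int.toChars rem' ++ binaryStr)
      (decimal + rem' * 2 ^ count.toNat) (count + 1)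
  else (binaryStr, decimal, count)
termination_by n.toNat
decreasing_by
  have h1 : PySem.Int.floordiv n 2 < n := by
    rw [PySem.Int.floordiv_lt_iff_lt_mul (by omega)]; omega
  have _h2 : (0 : Int) ≤ PySem.Int.floordiv n 2 := by
    have := (PySem.Int.le_floordiv_iff_mul_le (a := n) (b := 2) (q := 0) (by omega)).mpr
    simpa using this (by omega)
  omega

-- int(binaryStr): ofChars? (none = ValueError, excluded by Pre_ below)
def decimalToComplimentBinary (n : Int) : Int :=
  if n = 0 then 1
  else if n = 1 then 0
  else if n = 2 then 1
  else (PySem.Int.ofChars? (pvLoopA n [] 0 0).1).getD 0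

-- ===== PORT B =====
-- bin(n)[2:]: the string slice is taken on the char list (exact); int(...) = ofChars?,
-- total on Pre_ via .getD 0.
def decimalToComplimentBinary_alt (n : Int) : Int :=
  let s := PySem.List.slice (PySem.Int.toBinChars0b n) (some 2) none
  let flipped := s.map (fun c => if c = '0' then '1' else '0')
  (PySem.Int.ofChars? flipped).getD 0

-- ===== PRECONDITION & SPEC =====
-- A raises ValueError on n < 0 (the loop never runs, int("") fails), so Pre_ is n ≥ 0.
def Pre_decimalToComplimentBinary (n : Int) : Prop := 0 ≤ n
instance (n : Int) : Decidable (Pre_decimalToComplimentBinary n) := by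
  unfold Pre_decimalToComplimentBinary; infer_instance

def pvWitness_decimalToComplimentBinary : Int := 5

def Spec_decimalToComplimentBinary (n : Int) (out : Int) : Prop := out = decimalToComplimentBinary_alt n
instance (n : Int) (out : Int) : Decidable (Spec_decimalToComplimentBinary n out) := by unfold Spec_decimalToComplimentBinary; infer_instance

-- ===== CLAIM (what is proved, stated in full; the proofs are below) =====
def Claim_equal_decimalToComplimentBinary : Prop := ∀ (n : Int), Dom_decimalToComplimentBinary n → Pre_decimalToComplimentBinary n → Spec_decimalToComplimentBinary n (decimalToComplimentBinary n)

-- ===== LEMMAS AND PROOFS =====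

-- the character flip used by B
def pvFlip (c : Char) : Char := if c = '0' then '1' else '0'

-- A's loop on a positive number prepends exactly the flipped binary digits.
theorem pvLoopA_chars (m : Nat) (hm : 1 ≤ m) :
    ∀ (acc : List Char) (d c : Int),
      (pvLoopA (m : Int) acc d c).1 = (Nat.toDigits 2 m).map pvFlip ++ acc := by
  induction m using Nat.strong_induction_on with
  | _ m ih =>
    intro acc d c
    rw [pvLoopA]
    have h1 : (1 : Int) ≤ (m : Int) := by exact_mod_cast hm
    rw [dif_pos h1]
    have hmod : PySem.Int.mod (m : Int) 2 = ((m % 2 : Nat) : Int) := by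
      simp [PySem.Int.mod, Int.fmod_eq_emod]
    have hdiv : PySem.Int.floordiv (m : Int) 2 = ((m / 2 : Nat) : Int) := by
      simp [PySem.Int.floordiv, Int.fdiv_eq_ediv]
    rw [hmod, hdiv]
    rcases Nat.lt_or_ge m 2 with hlt | hge
    · -- m = 1: the recursive call stops at once
      interval_cases m
      have hg : PySem.Int.toChars 0 = List.map pvFlip (Nat.toDigits 2 1) := by decide
      simp only [Nat.reduceDiv, Nat.reduceMod, Nat.cast_zero, Nat.cast_one]
      rw [pvLoopA, dif_neg (by norm_num)]
      norm_num [hg]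
    · -- m ≥ 2: one digit is peeled off, recurse on m / 2
      have hd2 : 1 ≤ m / 2 := Nat.one_le_div_iff (by omega) |>.mpr (by omega)
      have hrec := ih (m / 2) (by omega) hd2
      rw [Nat.toDigits_of_base_le (by omega) hge]
      rcases Nat.mod_two_eq_zero_or_one m with he | he
      · rw [he]
        norm_num
        rw [show ((m:Int)/2) = ((m/2 : Nat) : Int) by omega, hrec]
        have hg : PySem.Int.toChars 1 = [pvFlip (Nat.digitChar 0)] := by decide
        simp [hg]
      · rw [he]
        norm_num
        rw [show ((m:Int)/2) = ((m/2 : Nat) : Int) by omega, hrec]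
        have hg : PySem.Int.toChars 0 = [pvFlip (Nat.digitChar 1)] := by decide
        simp [hg]

-- B's port, unfolded on a nonnegative input
theorem pvAlt_eq (n : Int) (hn : 0 ≤ n) :
    decimalToComplimentBinary_alt n
      = (PySem.Int.ofChars? ((Nat.toDigits 2 n.toNat).map pvFlip)).getD 0 := by
  unfold decimalToComplimentBinary_alt
  have hb : PySem.Int.toBinChars0b n = '0' :: 'b' :: Nat.toDigits 2 n.toNat := by
    simp [PySem.Int.toBinChars0b, not_lt.mpr hn]
  rw [hb]
  have : PySem.List.slice ('0' :: 'b' :: Nat.toDigits 2 n.toNat) (some ((2 : Nat) : Int)) none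
      = ('0' :: 'b' :: Nat.toDigits 2 n.toNat).drop 2 := PySem.List.slice_from_natCast _ _
  simp only [Nat.cast_ofNat] at this
  rw [this]
  rfl

-- ===== VERDICT (by name: the statement is the Claim_ definition above) =====
theorem decimalToComplimentBinary_spec : Claim_equal_decimalToComplimentBinary := by
  intro n _ hpre
  unfold Spec_decimalToComplimentBinary
  unfold decimalToComplimentBinary
  rcases eq_or_ne n 0 with rfl | h0
  · rw [if_pos rfl, pvAlt_eq 0 (by omega)]; decide
  rcases eq_or_ne n 1 with rfl | h1
  · rw [if_neg h0, if_pos rfl, pvAlt_eq 1 (by omega)]; decide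
  rcases eq_or_ne n 2 with rfl | h2
  · rw [if_neg h0, if_neg h1, if_pos rfl, pvAlt_eq 2 (by omega)]; decide
  · rw [if_neg h0, if_neg h1, if_neg h2, pvAlt_eq n hpre]
    have hm : 1 ≤ n.toNat := by
      have : 0 < n := lt_of_le_of_ne hpre (Ne.symm h0); omega
    have hcast : ((n.toNat : Nat) : Int) = n := Int.toNat_of_nonneg hpre
    have := pvLoopA_chars n.toNat hm [] 0 0
    rw [hcast] at this
    rw [this]
    simp
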